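-- pv_equiv track=rewrite | github.com/RainBell98/python-algorithm | codeClear.py | solution
-- ===== SOURCE A (Python) =====
-- def solution(code):
--     answer = ''
--     code = list(code)
--     mode = 0
--
--     for i in range(len(code)):
--         if(code[i].isnumeric() == True):
--             mode+=1
--         if(mode%2 ==0  and code[i].isnumeric() == False):
--             if(i%2==0):
--                 answer+=code[i]
--         elif(mode%2!= 0 and code[i].isnumeric()== False):
--             if(i%2!=0):
--                 answer+= code[i]
--     if(answer == ""):
--         return "EMPTY"
--     return answer
-- ===== SOURCE B (Python) =====
-- def solution(code):
--     # The toggle in the original is equivalent to: drop the digits, then keep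
--     # every second remaining character starting with the first.
--     kept = [c for c in code if not c.isnumeric()]
--     ans = ''.join(kept[::2])
--     return ans if ans else 'EMPTY'
-- ===== Notes on version B (the rewrite author's own statement) =====
-- stated objective: simpler
-- what changed: A's single fused loop with a running numeric counter and an index-parity toggle is replaced by the observation that its condition keeps exactly every second non-numeric character, so B just filters out the numerics and takes kept[::2].
import Mathlib
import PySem

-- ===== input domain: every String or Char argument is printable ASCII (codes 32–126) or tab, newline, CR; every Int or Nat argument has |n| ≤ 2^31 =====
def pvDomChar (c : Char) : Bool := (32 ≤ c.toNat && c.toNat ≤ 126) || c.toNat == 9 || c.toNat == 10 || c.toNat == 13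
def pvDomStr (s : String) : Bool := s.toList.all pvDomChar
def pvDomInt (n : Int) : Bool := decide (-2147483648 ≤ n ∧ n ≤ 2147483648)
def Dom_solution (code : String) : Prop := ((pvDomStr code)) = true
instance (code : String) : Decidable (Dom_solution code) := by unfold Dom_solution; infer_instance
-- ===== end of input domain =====

-- B replaces A's fused index/parity-toggle loop by "filter out the digits, keep every
-- second remaining character" (filter + [::2]); objective: simpler. Return values only
-- (neither program mutates its argument). On the ASCII domain str.isnumeric coincides
-- with str.isdigit; both ports use PySem.Chars.isdigit, exact there.

-- ===== PORT A =====
-- A's loop body: 'answer' is the List Char of the accumulated string, 'mode' the counter.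
def solutionStep (st : List Char × Int) (ic : Int × Char) : List Char × Int :=
  let i := ic.1
  let c := ic.2
  let mode := if PySem.Chars.isdigit c then st.2 + 1 else st.2
  let answer :=
    if PySem.Int.mod mode 2 = 0 ∧ PySem.Chars.isdigit c = false then
      (if PySem.Int.mod i 2 = 0 then st.1 ++ [c] else st.1)
    else if PySem.Int.mod mode 2 ≠ 0 ∧ PySem.Chars.isdigit c = false then
      (if PySem.Int.mod i 2 ≠ 0 then st.1 ++ [c] else st.1)
    else st.1
  (answer, mode)

-- 'for i in range(len(code)): … code[i] …' traversed as enumerate of the same list.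
def solution (code : String) : String :=
  let st := (PySem.List.enumerate code.toList 0).foldl solutionStep ([], 0)
  if st.1 = [] then "EMPTY" else String.ofList st.1

-- ===== PORT B =====
def solution_alt (code : String) : String :=
  let kept := code.toList.filter (fun c => !PySem.Chars.isdigit c)
  let ans := (PySem.List.slice? kept none none 2).getD []   -- kept[::2]; step 2 ≠ 0, never none
  if ans = [] then "EMPTY" else String.ofList ans

-- ===== PRECONDITION & SPEC =====
def Spec_solution (code : String) (out : String) : Prop := out = solution_alt code
instance (code : String) (out : String) : Decidable (Spec_solution code out) := by unfold Spec_solution; infer_instance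

-- ===== CLAIM (what is proved, stated in full; the proofs are below) =====
def Claim_equal_solution : Prop := ∀ (code : String), Dom_solution code → Spec_solution code (solution code)

-- ===== LEMMAS AND PROOFS =====

-- every second element, starting with the first (what kept[::2] computes)
def pvEvens {α : Type} : List α → List α
  | [] => []
  | [x] => [x]
  | x :: _ :: t => x :: pvEvens t

-- every second element, starting with the second
def pvOdds {α : Type} (l : List α) : List α := pvEvens l.tail

theorem pvEvens_cons {α : Type} (c : α) (l : List α) :
    pvEvens (c :: l) = c :: pvOdds l := by
  cases l <;> simp [pvEvens, pvOdds]

theorem pv_filterMap_range_evens {α : Type} (xs : List α) :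
    List.filterMap (fun k : Nat => xs[(2 * (k : Int)).toNat]?) (List.range ((xs.length + 1) / 2))
      = pvEvens xs := by
  induction xs using pvEvens.induct with
  | case1 => simp [pvEvens]
  | case2 x =>
    have h1 : (([x] : List α).length + 1) / 2 = 1 := by simp
    rw [h1, List.range_one]
    simp [pvEvens]
  | case3 x y t ih =>
    have hcnt : ((x :: y :: t).length + 1) / 2 = (t.length + 1) / 2 + 1 := by
      simp only [List.length_cons]; omega
    rw [hcnt, List.range_succ_eq_map, List.filterMap_cons, List.filterMap_map]
    have hf : ∀ k : Nat,
        ((fun k : Nat => (x :: y :: t)[(2 * (k : Int)).toNat]?) ∘ Nat.succ) k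
          = (fun k : Nat => t[(2 * (k : Int)).toNat]?) k := by
      intro k
      have h2 : (2 * ((k : Int) + 1)).toNat = 2 * k + 1 + 1 := by push_cast; omega
      have h3 : (2 * ((k : Nat) : Int)).toNat = 2 * k := by push_cast; omega
      simp only [Function.comp, Nat.succ_eq_add_one, Nat.cast_add, Nat.cast_one, h2, h3,
        List.getElem?_cons_succ]
    rw [List.filterMap_congr (by intro k _; exact hf k)]
    simp [pvEvens, ih]

-- kept[::2] is pvEvens
theorem pv_slice2_eq_evens {α : Type} (xs : List α) :
    (PySem.List.slice? xs none none 2).getD [] = pvEvens xs := by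
  have h : PySem.List.slice? xs none none 2
      = some (List.filterMap (fun k : Nat => xs[(2 * (k : Int)).toNat]?)
          (List.range ((xs.length + 1) / 2))) := by
    simp only [PySem.List.slice?, PySem.List.sliceIndices]
    norm_num
    have hc : (if 0 < xs.length then (((xs.length : Int) + 2 - 1) / 2).toNat else 0)
        = (xs.length + 1) / 2 := by split <;> omega
    rw [hc]
  rw [h, Option.getD_some, pv_filterMap_range_evens]

-- the loop invariant of A's fold: the kept characters are evens/odds of the digit-free
-- suffix, the phase being whether mode and the index have equal parity
theorem pv_foldA_inv (cs : List Char) :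
    ∀ (i0 mode : Int) (ans : List Char), 0 ≤ i0 → 0 ≤ mode →
    ((PySem.List.enumerate cs i0).foldl solutionStep (ans, mode)).1 =
      ans ++ (if PySem.Int.mod mode 2 = PySem.Int.mod i0 2
              then pvEvens (cs.filter (fun c => !PySem.Chars.isdigit c))
              else pvOdds (cs.filter (fun c => !PySem.Chars.isdigit c))) := by
  induction cs with
  | nil => intro i0 mode ans _ _; simp [PySem.List.enumerate, pvEvens, pvOdds]
  | cons c cs ih =>
    intro i0 mode ans hi hm
    have h2 : (0 : Int) < 2 := by omega
    rw [PySem.List.enumerate_cons, List.foldl_cons]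
    by_cases hd : PySem.Chars.isdigit c
    · have hstep : solutionStep (ans, mode) (i0, c) = (ans, mode + 1) := by
        simp [solutionStep, hd]
      rw [hstep, ih (i0 + 1) (mode + 1) ans (by omega) (by omega)]
      simp only [PySem.Int.mod_eq_emod_of_pos h2, hd, Bool.not_true, List.filter]
      by_cases hb : mode % 2 = i0 % 2
      · rw [if_pos (by omega : (mode + 1) % 2 = (i0 + 1) % 2), if_pos hb]
      · rw [if_neg (by omega : ¬ (mode + 1) % 2 = (i0 + 1) % 2), if_neg hb]
    · by_cases hb : PySem.Int.mod mode 2 = PySem.Int.mod i0 2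
      · -- phase "take": c is kept, phase flips
        have hd' : PySem.Chars.isdigit c = false := by simpa using hd
        simp only [PySem.Int.mod_eq_emod_of_pos h2] at hb
        have hstep : solutionStep (ans, mode) (i0, c) = (ans ++ [c], mode) := by
          by_cases mz : mode % 2 = 0
          · simp [solutionStep, hd', mz, show i0 % 2 = 0 by omega]
          · simp [solutionStep, hd', show mode % 2 = 1 by omega, show i0 % 2 = 1 by omega]
        rw [hstep, ih (i0 + 1) mode (ans ++ [c]) (by omega) hm]
        simp only [PySem.Int.mod_eq_emod_of_pos h2, hd', List.filter, Bool.not_false]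
        rw [if_neg (by omega : ¬ mode % 2 = (i0 + 1) % 2), if_pos hb, pvEvens_cons]
        simp
      · -- phase "skip": c dropped, phase flips
        have hd' : PySem.Chars.isdigit c = false := by simpa using hd
        simp only [PySem.Int.mod_eq_emod_of_pos h2] at hb
        have hstep : solutionStep (ans, mode) (i0, c) = (ans, mode) := by
          by_cases mz : mode % 2 = 0
          · simp [solutionStep, hd', mz, show i0 % 2 = 1 by omega]
          · simp [solutionStep, hd', show mode % 2 = 1 by omega, show i0 % 2 = 0 by omega]
        rw [hstep, ih (i0 + 1) mode ans (by omega) hm]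
        simp only [PySem.Int.mod_eq_emod_of_pos h2, hd', List.filter, Bool.not_false]
        rw [if_pos (by omega : mode % 2 = (i0 + 1) % 2), if_neg hb]
        simp [pvOdds]

-- ===== VERDICT (by name: the statement is the Claim_ definition above) =====
theorem solution_spec : Claim_equal_solution := by
  intro code _
  unfold Spec_solution
  simp only [solution, solution_alt]
  rw [pv_slice2_eq_evens]
  have h := pv_foldA_inv code.toList 0 0 [] (by omega) (by omega)
  simp [h]
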